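-- pv_equiv track=rewrite | github.com/Haibara-Ai97/DEM | Adapter/eval_mllm.py | norm_multilabel
-- ===== SOURCE A (Python) =====
-- from typing import Any, Dict, Iterable, List, Optional, Sequence, Tuple
--
-- def norm_multilabel(text: str, vocab: Sequence[str]) -> Optional[List[str]]:
--     t = text.strip().lower()
--     if not t:
--         return None
--     if t == "none" or t.startswith("none"):
--         return []
--     parts = [p.strip() for p in t.split(",")]
--     labels = []
--     for p in parts:
--         if not p:
--             continue
--         best = None
--         for v in vocab:
--             if p == v:
--                 best = v
--                 break
--         if best is None:
--             for v in vocab: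
--                 if v in p or p in v:
--                     best = v
--                     break
--         if best is not None:
--             labels.append(best)
--     seen, out = set(), []
--     for x in labels:
--         if x not in seen:
--             out.append(x)
--             seen.add(x)
--     return out
-- ===== SOURCE B (Python) =====
-- def _match(p, vocab):
--     # one fused scan: exact match returns immediately, first substring hit is remembered
--     sub = None
--     for v in vocab:
--         if p == v:
--             return v
--         if sub is None and (v in p or p in v):
--             sub = v
--     return sub
--
--
-- def norm_multilabel(text, vocab):
--     t = text.strip().lower()
--     if not t:
--         return None
--     if t.startswith("none"):
--         return []
--     labels = []
--     for raw in t.split(","):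
--         p = raw.strip()
--         if p:
--             m = _match(p, vocab)
--             if m is not None:
--                 labels.append(m)
--     return list(dict.fromkeys(labels))
-- ===== Notes on version B (the rewrite author's own statement) =====
-- stated objective: simpler
-- what changed: The two separate vocab scans per part (exact scan, then substring scan) are fused into one early-returning scan that remembers the first substring candidate, the 't == "none"' test is absorbed into startswith, and the hand-rolled seen-set dedup loop becomes dict.fromkeys.
import Mathlib
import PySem

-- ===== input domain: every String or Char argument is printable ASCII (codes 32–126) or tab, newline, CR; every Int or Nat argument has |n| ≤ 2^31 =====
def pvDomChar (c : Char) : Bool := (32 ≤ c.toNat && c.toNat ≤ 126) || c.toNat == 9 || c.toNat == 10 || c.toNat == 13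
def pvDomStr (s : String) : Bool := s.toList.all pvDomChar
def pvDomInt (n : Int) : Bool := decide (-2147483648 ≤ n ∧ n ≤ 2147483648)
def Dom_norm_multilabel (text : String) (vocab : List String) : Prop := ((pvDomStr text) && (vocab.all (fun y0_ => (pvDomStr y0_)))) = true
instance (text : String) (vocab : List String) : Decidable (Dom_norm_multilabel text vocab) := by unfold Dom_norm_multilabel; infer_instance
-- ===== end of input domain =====

-- ===== PORT A =====
-- B fuses A's two per-part vocab scans into one early-returning scan and replaces
-- the hand-rolled seen-set dedup loop with dict.fromkeys (objective: simpler).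

-- first v in vocab with p == v (A's first inner loop, breaking on a hit)
def aExact (p : String) : List String → Option String
  | [] => none
  | v :: vs => if p = v then some v else aExact p vs

-- first v in vocab with v in p or p in v (A's second inner loop)
def aSub (p : String) : List String → Option String
  | [] => none
  | v :: vs => if PySem.Str.isIn v p || PySem.Str.isIn p v then some v else aSub p vs

-- A's final dedup loop over labels, carrying seen (a Python set) and out
def aDedup : List String → PySem.Set String → List String → List String
  | [], _, out => out
  | x :: xs, seen, out =>
    if PySem.Set.contains seen x then aDedup xs seen out
    else aDedup xs (PySem.Set.add seen x) (out ++ [x])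

def norm_multilabel (text : String) (vocab : List String) : Option (List String) :=
  let t := PySem.Str.lower (PySem.Str.strip text)
  if t = "" then none
  else if t = "none" || PySem.Str.startswith t "none" then some []
  else
    let parts := ((PySem.Str.split? t ",").getD []).map PySem.Str.strip
    let labels := parts.foldl (fun labels p =>
      if p = "" then labels
      else
        let best := aExact p vocab
        let best := match best with
          | none => aSub p vocab
          | some b => some b
        match best with
        | none => labels
        | some b => labels ++ [b]) []
    some (aDedup labels PySem.Set.empty [])

-- ===== PORT B =====
-- B's _match: single scan, returning on an exact hit, remembering the first substring hit
def bMatch (p : String) (sub : Option String) : List String → Option String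
  | [] => sub
  | v :: vs =>
    if p = v then some v
    else if sub = none && (PySem.Str.isIn v p || PySem.Str.isIn p v) then
      bMatch p (some v) vs
    else bMatch p sub vs

def norm_multilabel_alt (text : String) (vocab : List String) : Option (List String) :=
  let t := PySem.Str.lower (PySem.Str.strip text)
  if t = "" then none
  else if PySem.Str.startswith t "none" then some []
  else
    let labels := ((PySem.Str.split? t ",").getD []).foldl (fun labels raw =>
      let p := PySem.Str.strip raw
      if p ≠ "" then
        match bMatch p none vocab with
        | some m => labels ++ [m]
        | none => labels
      else labels) []
    some (PySem.List.dedup labels)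

-- ===== PRECONDITION & SPEC =====
def Spec_norm_multilabel (text : String) (vocab : List String) (out : Option (List String)) : Prop := out = norm_multilabel_alt text vocab
instance (text : String) (vocab : List String) (out : Option (List String)) : Decidable (Spec_norm_multilabel text vocab out) := by unfold Spec_norm_multilabel; infer_instance

-- ===== CLAIM (what is proved, stated in full; the proofs are below) =====
def Claim_equal_norm_multilabel : Prop := ∀ (text : String) (vocab : List String), Dom_norm_multilabel text vocab → Spec_norm_multilabel text vocab (norm_multilabel text vocab)

-- ===== LEMMAS AND PROOFS =====

-- the fused scan equals: exact hit if any, else a pending candidate, else the substring scan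
lemma bMatch_eq (p : String) (l : List String) (sub : Option String) :
    bMatch p sub l =
      match aExact p l with
      | some v => some v
      | none => match sub with
        | some s => some s
        | none => aSub p l := by
  induction l generalizing sub with
  | nil => cases sub <;> simp only [bMatch, aExact, aSub]
  | cons v vs ih =>
    simp only [bMatch, aExact, aSub]
    by_cases hpv : p = v
    · simp [hpv]
    · simp only [hpv, if_false]
      cases sub with
      | some s =>
        simp only [ih]
        cases aExact p vs <;> rfl
      | none =>
        by_cases hs : (PySem.Str.isIn v p || PySem.Str.isIn p v) = true
        · simp only [hs, if_true, ih]
          cases aExact p vs <;> rfl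
        · simp only [hs, ih]
          cases aExact p vs <;> rfl

-- the per-part bodies of the two label loops agree (A maps strip first; B strips inside)
lemma labels_eq (vocab : List String) (parts : List String) :
    (parts.map PySem.Str.strip).foldl (fun labels p =>
      if p = "" then labels
      else
        let best := aExact p vocab
        let best := match best with
          | none => aSub p vocab
          | some b => some b
        match best with
        | none => labels
        | some b => labels ++ [b]) [] =
    parts.foldl (fun labels raw =>
      let p := PySem.Str.strip raw
      if p ≠ "" then
        match bMatch p none vocab with
        | some m => labels ++ [m]
        | none => labels
      else labels) [] := by
  rw [List.foldl_map]
  congr 1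
  funext labels raw
  by_cases hp : PySem.Str.strip raw = ""
  · simp [hp]
  · simp only [hp, ne_eq, not_false_iff, if_true, if_false]
    rw [bMatch_eq]
    cases aExact (PySem.Str.strip raw) vocab with
    | some b => rfl
    | none => cases aSub (PySem.Str.strip raw) vocab <;> rfl

-- A's dedup loop with out = seen is Python's dict.fromkeys dedup
lemma aDedup_eq (l : List String) (s : PySem.Set String) :
    aDedup l s s = l.foldl PySem.Set.add s := by
  induction l generalizing s with
  | nil => simp [aDedup]
  | cons x xs ih =>
    by_cases h : x ∈ s
    · simp [aDedup, PySem.Set.add, h, ih]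
    · simp [aDedup, PySem.Set.add, h, ih]

-- ===== VERDICT (by name: the statement is the Claim_ definition above) =====
set_option maxHeartbeats 1000000 in
theorem norm_multilabel_spec : Claim_equal_norm_multilabel := by
  intro text vocab _
  unfold Spec_norm_multilabel norm_multilabel norm_multilabel_alt
  set t := PySem.Str.lower (PySem.Str.strip text) with ht
  by_cases h0 : t = ""
  · simp [h0]
  · simp only [h0, if_false]
    by_cases hn : PySem.Str.startswith t "none" = true
    · simp only [hn]
      simp
    · have hn' : PySem.Str.startswith t "none" = false := by simpa using hn
      have hne : t ≠ "none" := by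
        intro h; rw [h] at hn'; exact absurd hn' (by decide)
      have hn2 : PySem.Chars.startswith t.toList ['n', 'o', 'n', 'e'] = false := by
        simpa using hn
      rw [if_neg (by simp [hn2, hne]), if_neg (by simp [hn2])]
      have key : ∀ L : List String, aDedup L PySem.Set.empty [] = PySem.List.dedup L := by
        intro L
        rw [PySem.List.dedup_eq_ofList, PySem.Set.ofList_eq_foldl]
        exact aDedup_eq L PySem.Set.empty
      rw [key, labels_eq]
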